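-- pv_equiv track=rewrite | github.com/WHOOZ-23/Algorithm | 프로그래머스/0/120861. 캐릭터의 좌표/캐릭터의 좌표.py | solution
-- ===== SOURCE A (Python) =====
-- def solution(keyinput, board):
--     move = {"up": [0, 1], "down": [0, -1], "left": [-1, 0], "right": [1, 0]}
--     user = [0, 0]
--     [board_x, board_y] = [board[0] // 2, board[1] // 2]
--
--     for m in keyinput:
--         if abs(user[0] + move[m][0]) <= board_x:
--             user[0] += move[m][0]
--
--         if abs(user[1] + move[m][1]) <= board_y:
--             user[1] += move[m][1]
--
--     return user
-- ===== SOURCE B (Python) =====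
-- def solution(keyinput, board):
--     bx, by = board[0] // 2, board[1] // 2
--     x = 0
--     for k in keyinput:
--         if k == "left" or k == "right":
--             d = -1 if k == "left" else 1
--             if abs(x + d) <= bx:
--                 x += d
--     y = 0
--     for k in keyinput:
--         if k == "up" or k == "down":
--             d = 1 if k == "up" else -1
--             if abs(y + d) <= by:
--                 y += d
--     return [x, y]
-- ===== Notes on version B (the rewrite author's own statement) =====
-- stated objective: alternative
-- what changed: B decomposes the walk by axis: two independent scalar saturating walks (one pass over left/right keys updating x, one over up/down keys updating y) replace A's single loop over a pair state with dict-driven deltas; Pre_ excludes only inputs where A raises (board shorter than 2: IndexError; a key outside {up,down,left,right}: KeyError).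
import Mathlib
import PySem

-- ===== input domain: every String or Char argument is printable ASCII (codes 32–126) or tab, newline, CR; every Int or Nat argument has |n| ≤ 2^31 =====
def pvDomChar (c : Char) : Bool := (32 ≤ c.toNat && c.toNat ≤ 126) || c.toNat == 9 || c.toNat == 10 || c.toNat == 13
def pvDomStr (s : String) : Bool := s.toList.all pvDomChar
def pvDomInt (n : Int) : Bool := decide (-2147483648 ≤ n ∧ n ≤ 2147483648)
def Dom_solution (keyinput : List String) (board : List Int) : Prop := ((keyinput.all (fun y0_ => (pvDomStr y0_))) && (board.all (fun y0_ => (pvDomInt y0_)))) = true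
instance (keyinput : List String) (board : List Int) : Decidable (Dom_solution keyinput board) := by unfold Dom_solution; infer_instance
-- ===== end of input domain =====

-- B replaces A's single pair-state loop with two independent per-axis saturating walks (alternative decomposition, same cost).
-- ===== PORT A =====
-- A's loop body: dict-driven delta, each coordinate updated when the saturation test passes.
def stepA (bx by_ : Int) (u : Int × Int) (m : String) : Int × Int :=
  let move : PySem.Dict String (List Int) :=
    PySem.Dict.ofList [("up", [0, 1]), ("down", [0, -1]), ("left", [-1, 0]), ("right", [1, 0])]
  let mv := (move.get? m).getD [0, 0]   -- Pre_ excludes keys where get? = none (Python KeyError)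
  let dx := (PySem.List.pyGet? mv 0).getD 0
  let dy := (PySem.List.pyGet? mv 1).getD 0
  let u0 := if |u.1 + dx| ≤ bx then u.1 + dx else u.1
  let u1 := if |u.2 + dy| ≤ by_ then u.2 + dy else u.2
  (u0, u1)

def solution (keyinput : List String) (board : List Int) : List Int :=
  let bx := PySem.Int.floordiv ((PySem.List.pyGet? board 0).getD 0) 2  -- Pre_ excludes |board| < 2 (IndexError)
  let by_ := PySem.Int.floordiv ((PySem.List.pyGet? board 1).getD 0) 2
  let user := keyinput.foldl (stepA bx by_) (0, 0)
  [user.1, user.2]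

-- ===== PORT B =====
def stepX (bx : Int) (x : Int) (k : String) : Int :=
  if k = "left" ∨ k = "right" then
    let d : Int := if k = "left" then -1 else 1
    if |x + d| ≤ bx then x + d else x
  else x

def stepY (by_ : Int) (y : Int) (k : String) : Int :=
  if k = "up" ∨ k = "down" then
    let d : Int := if k = "up" then 1 else -1
    if |y + d| ≤ by_ then y + d else y
  else y

def solution_alt (keyinput : List String) (board : List Int) : List Int :=
  let bx := PySem.Int.floordiv ((PySem.List.pyGet? board 0).getD 0) 2
  let by_ := PySem.Int.floordiv ((PySem.List.pyGet? board 1).getD 0) 2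
  let x := keyinput.foldl (stepX bx) 0
  let y := keyinput.foldl (stepY by_) 0
  [x, y]

-- ===== PRECONDITION & SPEC =====
-- Pre_ excludes inputs on which Python A raises: boards with fewer than 2 entries (IndexError)
-- and any key outside {"up","down","left","right"} (KeyError from move[m]).
def Pre_solution (keyinput : List String) (board : List Int) : Prop :=
  2 ≤ board.length ∧ ∀ k ∈ keyinput, k = "up" ∨ k = "down" ∨ k = "left" ∨ k = "right"
instance (keyinput : List String) (board : List Int) : Decidable (Pre_solution keyinput board) := by
  unfold Pre_solution; infer_instance

def pvWitness_solution : List String × List Int := (["up", "left", "up", "right"], [7, 5])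

def Spec_solution (keyinput : List String) (board : List Int) (out : List Int) : Prop := out = solution_alt keyinput board
instance (keyinput : List String) (board : List Int) (out : List Int) : Decidable (Spec_solution keyinput board out) := by unfold Spec_solution; infer_instance

-- ===== CLAIM (what is proved, stated in full; the proofs are below) =====
def Claim_equal_solution : Prop := ∀ (keyinput : List String) (board : List Int), Dom_solution keyinput board → Pre_solution keyinput board → Spec_solution keyinput board (solution keyinput board)


-- ===== LEMMAS AND PROOFS =====

-- On a valid key, A's pair step is exactly the two axis steps applied componentwise.
theorem moveDict_eval (k : String) (hk : k = "up" ∨ k = "down" ∨ k = "left" ∨ k = "right") :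
    ((PySem.Dict.ofList [("up", ([0, 1] : List Int)), ("down", [0, -1]), ("left", [-1, 0]), ("right", [1, 0])]).get? k)
      = some (if k = "up" then [0, 1] else if k = "down" then [0, -1] else if k = "left" then [-1, 0] else [1, 0]) := by
  rcases hk with h | h | h | h <;> subst h <;> decide

theorem stepA_eq (bx by_ : Int) (x y : Int) (k : String)
    (hk : k = "up" ∨ k = "down" ∨ k = "left" ∨ k = "right") :
    stepA bx by_ (x, y) k = (stepX bx x k, stepY by_ y k) := by
  rcases hk with h | h | h | h <;> subst h <;>
    simp [stepA, stepX, stepY, moveDict_eval]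

theorem foldl_split (bx by_ : Int) :
    ∀ (l : List String) (x y : Int),
      (∀ k ∈ l, k = "up" ∨ k = "down" ∨ k = "left" ∨ k = "right") →
      l.foldl (stepA bx by_) (x, y) = (l.foldl (stepX bx) x, l.foldl (stepY by_) y) := by
  intro l
  induction l with
  | nil => intro x y _; rfl
  | cons k t ih =>
      intro x y h
      simp only [List.foldl_cons]
      rw [stepA_eq bx by_ x y k (h k (by simp))]
      exact ih _ _ (fun k' hk' => h k' (by simp [hk']))

-- ===== VERDICT (by name: the statement is the Claim_ definition above) =====
theorem solution_spec : Claim_equal_solution := by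
  intro keyinput board _ hpre
  unfold Spec_solution
  simp only [solution, solution_alt]
  rw [foldl_split _ _ keyinput 0 0 hpre.2]
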